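-- pv_equiv track=rewrite | github.com/WenBonsai/nobodywho | quick_start_tool_call.py | extract_brewing_guide
-- ===== SOURCE A (Python) =====
-- GUIDE_FIELDS = ["Process:", "Flavor notes:", "Grind:", "Temperature:", "Note:"]
--
-- def extract_brewing_guide(text: str) -> str:
--     lines = [line.strip() for line in text.splitlines() if line.strip()]
--     guide_lines = []
--
--     for field in GUIDE_FIELDS:
--         match = next((line for line in lines if line.startswith(field)), None)
--         if match:
--             guide_lines.append(match)
--
--     if guide_lines:
--         return "\n".join(guide_lines)
--
--     return text.strip()
-- ===== SOURCE B (Python) =====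
-- GUIDE_FIELDS = ["Process:", "Flavor notes:", "Grind:", "Temperature:", "Note:"]
--
-- def extract_brewing_guide(text: str) -> str:
--     # One indexing pass over the lines (field -> first matching line), then one emit pass.
--     first = {}
--     for line in text.splitlines():
--         s = line.strip()
--         if not s:
--             continue
--         for field in GUIDE_FIELDS:
--             if s.startswith(field):
--                 first.setdefault(field, s)
--                 break
--     guide_lines = [first[f] for f in GUIDE_FIELDS if f in first]
--     return "\n".join(guide_lines) if guide_lines else text.strip()
-- ===== Notes on version B (the rewrite author's own statement) =====
-- stated objective: alternative
-- what changed: Instead of scanning the cleaned line list once per guide field (fields outer, next() inner), B makes a single pass over the lines building a dict field->first matching line (setdefault under the first field prefix hit), then one emit pass over GUIDE_FIELDS; fallback branch unchanged.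
import Mathlib
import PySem

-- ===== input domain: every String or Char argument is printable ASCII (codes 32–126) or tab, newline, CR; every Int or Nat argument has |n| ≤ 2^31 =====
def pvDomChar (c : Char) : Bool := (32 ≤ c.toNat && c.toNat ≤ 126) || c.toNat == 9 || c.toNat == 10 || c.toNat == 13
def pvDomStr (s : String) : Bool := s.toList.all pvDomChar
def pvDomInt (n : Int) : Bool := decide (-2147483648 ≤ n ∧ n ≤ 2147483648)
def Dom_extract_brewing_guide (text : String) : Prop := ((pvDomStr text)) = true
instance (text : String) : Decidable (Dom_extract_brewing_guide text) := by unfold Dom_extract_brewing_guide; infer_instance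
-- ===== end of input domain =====

-- B replaces A's per-field scans of the line list by a single indexing pass building a
-- field→first-matching-line dict, followed by one emit pass over GUIDE_FIELDS (objective: alternative).

def GUIDE_FIELDS : List String := ["Process:", "Flavor notes:", "Grind:", "Temperature:", "Note:"]

-- ===== PORT A =====
def extract_brewing_guide (text : String) : String :=
  let lines := ((PySem.Str.splitlines text).filter
                  (fun line => !(PySem.Str.strip line == ""))).map PySem.Str.strip
  let guide_lines := GUIDE_FIELDS.foldl (fun acc field =>
      match lines.find? (fun line => PySem.Str.startswith line field) with
      | some m => if m == "" then acc else acc ++ [m]   -- 'if match:' (None or empty string is falsy)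
      | none => acc) []
  if guide_lines == [] then PySem.Str.strip text
  else PySem.Str.join "\n" guide_lines

-- ===== PORT B =====
-- one line of Source B's indexing loop: strip, skip empties, record under the first matching field ('break')
def pvBLineStep (d : PySem.Dict String String) (line : String) : PySem.Dict String String :=
  let s := PySem.Str.strip line
  if s == "" then d
  else
    match GUIDE_FIELDS.find? (fun field => PySem.Str.startswith s field) with
    | some field => d.setdefault field s
    | none => d

def extract_brewing_guide_alt (text : String) : String :=
  let first := (PySem.Str.splitlines text).foldl pvBLineStep PySem.Dict.empty
  let guide_lines := GUIDE_FIELDS.filterMap (fun f => first.get? f)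
  if guide_lines == [] then PySem.Str.strip text
  else PySem.Str.join "\n" guide_lines

-- ===== PRECONDITION & SPEC =====
def Spec_extract_brewing_guide (text : String) (out : String) : Prop := out = extract_brewing_guide_alt text
instance (text : String) (out : String) : Decidable (Spec_extract_brewing_guide text out) := by unfold Spec_extract_brewing_guide; infer_instance

-- ===== CLAIM (what is proved, stated in full; the proofs are below) =====
def Claim_equal_extract_brewing_guide : Prop := ∀ (text : String), Dom_extract_brewing_guide text → Spec_extract_brewing_guide text (extract_brewing_guide text)

-- ===== LEMMAS AND PROOFS =====

-- Source B's loop body on an already-stripped non-empty line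
def pvStep (d : PySem.Dict String String) (s : String) : PySem.Dict String String :=
  match GUIDE_FIELDS.find? (fun field => PySem.Str.startswith s field) with
  | some field => d.setdefault field s
  | none => d

-- B's fold over raw lines = fold of pvStep over the cleaned line list A computes
lemma pv_fold_bridge : ∀ (xs : List String) (d : PySem.Dict String String),
    xs.foldl pvBLineStep d
      = ((xs.filter (fun line => !(PySem.Str.strip line == ""))).map PySem.Str.strip).foldl pvStep d := by
  intro xs
  induction xs with
  | nil => intro d; rfl
  | cons x xs ih =>
    intro d
    by_cases hx : PySem.Str.strip x = ""
    · simp [pvBLineStep, hx, ih]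
    · simp [pvBLineStep, pvStep, hx, ih]

-- no two distinct guide fields are prefixes of one another
lemma pv_pairs : ∀ p ∈ GUIDE_FIELDS, ∀ q ∈ GUIDE_FIELDS, p ≠ q → ¬ (p.toList <+: q.toList) := by
  decide

lemma pv_not_both (s p q : String) (hpq : p ≠ q) (hp : p ∈ GUIDE_FIELDS) (hq : q ∈ GUIDE_FIELDS)
    (h1 : PySem.Str.startswith s p = true) (h2 : PySem.Str.startswith s q = true) : False := by
  rw [PySem.Str.startswith_eq, PySem.Chars.startswith_iff] at h1 h2
  rcases List.prefix_or_prefix_of_prefix h1 h2 with h | h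
  · exact pv_pairs p hp q hq hpq h
  · exact pv_pairs q hq p hp (Ne.symm hpq) h

-- the dict after the indexing pass holds, for each field, the first line starting with it
lemma pv_inv (f : String) (hf : f ∈ GUIDE_FIELDS) :
    ∀ (ls : List String) (d : PySem.Dict String String),
      (ls.foldl pvStep d).get? f
        = (d.get? f).or (ls.find? (fun line => PySem.Str.startswith line f)) := by
  intro ls
  induction ls with
  | nil => intro d; simp
  | cons l ls ih =>
    intro d
    rw [List.foldl_cons, ih, List.find?_cons]
    cases h : GUIDE_FIELDS.find? (fun field => PySem.Str.startswith l field) with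
    | none =>
      have hlf : PySem.Str.startswith l f = false :=
        Bool.eq_false_iff.mpr (by simpa using List.find?_eq_none.mp h f hf)
      rw [show pvStep d l = d by unfold pvStep; rw [h], hlf]
    | some g =>
      have hg : PySem.Str.startswith l g = true := by
        have := List.find?_some h; simpa using this
      by_cases hgf : g = f
      · subst hgf
        rw [show pvStep d l = d.setdefault g l by unfold pvStep; rw [h], hg,
            PySem.Dict.get?_setdefault_self]
        cases hd : d.get? g <;> simp
      · have hlf : PySem.Str.startswith l f = false :=
          Bool.eq_false_iff.mpr (fun hlf =>
            pv_not_both l g f hgf (List.mem_of_find?_eq_some h) hf hg hlf)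
        rw [show pvStep d l = d.setdefault g l by unfold pvStep; rw [h],
            PySem.Dict.get?_setdefault_of_ne d l (Ne.symm hgf), hlf]

-- A's append loop over the fields = filterMap, given nonempty matches and pointwise-equal lookups
lemma pv_emit (o o' : String → Option String) :
    ∀ (fs : List String) (acc : List String),
      (∀ f ∈ fs, ∀ m, o f = some m → ¬ (m = "")) →
      (∀ f ∈ fs, o f = o' f) →
      fs.foldl (fun acc f =>
          match o f with
          | some m => if m == "" then acc else acc ++ [m]
          | none => acc) acc = acc ++ fs.filterMap o' := by
  intro fs
  induction fs with
  | nil => intro acc _ _; simp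
  | cons f fs ih =>
    intro acc hne hpt
    have hpt0 : o' f = o f := (hpt f (by simp)).symm
    rw [List.foldl_cons, List.filterMap_cons, hpt0]
    cases h : o f with
    | none =>
      exact ih acc (fun g hg m hm => hne g (by simp [hg]) m hm)
        (fun g hg => hpt g (by simp [hg]))
    | some m =>
      have hm : (m == "") = false := beq_eq_false_iff_ne.mpr (hne f (by simp) m h)
      simp only [hm, Bool.false_eq_true, if_false]
      rw [ih (acc ++ [m]) (fun g hg m hm => hne g (by simp [hg]) m hm)
        (fun g hg => hpt g (by simp [hg]))]
      simp

-- the two emit passes agree, for any cleaned line list with no empty line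
lemma pv_glue (lines : List String) (hne : ∀ m ∈ lines, ¬ (m = "")) :
    GUIDE_FIELDS.foldl (fun acc field =>
        match lines.find? (fun line => PySem.Str.startswith line field) with
        | some m => if m == "" then acc else acc ++ [m]
        | none => acc) []
      = GUIDE_FIELDS.filterMap (fun f => (lines.foldl pvStep PySem.Dict.empty).get? f) := by
  have := pv_emit (fun f => lines.find? (fun line => PySem.Str.startswith line f))
    (fun f => (lines.foldl pvStep PySem.Dict.empty).get? f) GUIDE_FIELDS []
    (fun f _ m hm => hne m (List.mem_of_find?_eq_some hm))
    (fun f hf => by simp only [pv_inv f hf lines PySem.Dict.empty, PySem.Dict.get?_empty, Option.none_or])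
  simpa using this

-- ===== VERDICT (by name: the statement is the Claim_ definition above) =====
theorem extract_brewing_guide_spec : Claim_equal_extract_brewing_guide := by
  intro text _
  unfold Spec_extract_brewing_guide
  simp only [extract_brewing_guide, extract_brewing_guide_alt]
  rw [pv_fold_bridge]
  rw [pv_glue _ (by
    intro m hm hm0
    rcases List.mem_map.mp hm with ⟨l, hl, hlm⟩
    have h2 := (List.mem_filter.mp hl).2
    rw [hlm, hm0] at h2
    simp at h2)]
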